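-- pv_equiv track=rewrite | github.com/Amit-Tomar/Parametrized-String-Matching-Implementation-for-Software-Plagiarism-Check | Test/PythonTestCode/ClassHuffman/IMT2013034_classhuffman.py | form_codes
-- ===== SOURCE A (Python) =====
-- def form_codes(root_symbol, code_stack):
--     '''
--     Return a hash with the huffman code for each input character
--     Algo: (i) Start from thuffman_he root symbol - has code '' (empty string)
--     (ii) For every element of the code_stack (starting from the end) - form its code by appending the additional bit to
--     the code of its parent (to be got from the hash already built)
--     (iii) Keep count of the total compressed length as the codes are being created
--     (iv) At the end, remove all the intermediate symbols created while forming the huffman tree from the hash,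
--     before returning the hash and the compressed length
--     '''
--     # Your code
--     huffman_code = {}
--     temp_dict = {}
--     temp_dict[root_symbol] = ''
--     index = len(code_stack) - 1
--     compressed_length = 0
--     while index >= 0:
--         element = code_stack[index][0]
--         parent = code_stack[index][2]
--         add_bit = code_stack[index][3]
--         temp_dict[element] = temp_dict[parent] + add_bit
--         index -= 1
--     index = len(code_stack) - 1
--     while index >= 0:
--         element = code_stack[index][0]
--         freq = code_stack[index][1]
--         if len(element) == 1:
--             huffman_code[element] = temp_dict[element]
--             compressed_length += len(huffman_code[element]) * freq
--         index -= 1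
--     return huffman_code, compressed_length
-- ===== SOURCE B (Python) =====
-- def form_codes(root_symbol, code_stack):
--     # Resolve each entry's parent to its defining index (the root resolves to None)
--     # in one backward pass, then compute each single-character symbol's code by
--     # walking up that index chain.
--     n = len(code_stack)
--     parent_idx = [None] * n
--     first_idx = {root_symbol: None}
--     for j in range(n - 1, -1, -1):
--         element, _freq, parent, _bit = code_stack[j]
--         parent_idx[j] = first_idx[parent]
--         first_idx[element] = j
--     huffman_code = {}
--     compressed_length = 0
--     for element, freq, _p, _b in reversed(code_stack):
--         if len(element) == 1:
--             code = ''
--             j = first_idx[element]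
--             while j is not None:
--                 code = code_stack[j][3] + code
--                 j = parent_idx[j]
--             huffman_code[element] = code
--             compressed_length += len(code) * freq
--     return huffman_code, compressed_length
-- ===== Notes on version B (the rewrite author's own statement) =====
-- stated objective: alternative
-- what changed: Instead of A's dict holding a code for every tree node (one reverse pass to fill it, a second reverse pass to read it), B resolves each entry's parent to its defining index in one backward pass and then computes each single-character symbol's code by walking up that index chain; Pre_ excludes exactly the inputs on which A raises KeyError (an entry whose parent is neither the root symbol nor defined later in the stack).
import Mathlib
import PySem

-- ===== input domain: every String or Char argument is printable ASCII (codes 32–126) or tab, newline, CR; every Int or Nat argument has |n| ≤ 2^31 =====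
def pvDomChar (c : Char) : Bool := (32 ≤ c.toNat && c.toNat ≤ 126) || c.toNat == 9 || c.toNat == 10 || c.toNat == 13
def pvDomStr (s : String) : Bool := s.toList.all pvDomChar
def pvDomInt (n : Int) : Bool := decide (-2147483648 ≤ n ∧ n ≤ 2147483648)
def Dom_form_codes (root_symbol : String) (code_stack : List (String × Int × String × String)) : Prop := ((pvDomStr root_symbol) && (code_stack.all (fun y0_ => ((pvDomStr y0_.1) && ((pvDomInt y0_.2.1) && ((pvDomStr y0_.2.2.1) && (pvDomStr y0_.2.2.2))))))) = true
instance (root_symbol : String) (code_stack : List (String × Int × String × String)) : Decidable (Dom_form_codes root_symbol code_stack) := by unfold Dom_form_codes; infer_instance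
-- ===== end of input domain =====

-- B replaces A's dict of codes for every tree node (two reverse passes) by a one-pass parent-index resolution plus a
-- per-leaf upward index-chain walk (alternative decomposition, same cost). Pre_ excludes exactly the inputs on which A
-- raises KeyError (an entry whose parent is neither the root symbol nor an element appearing later in the stack).


-- ===== PORT A =====
-- A's first descending-index while loop (building temp_dict), ported as a fold over code_stack.reverse;
-- temp_dict[parent] is getD with "" — Pre_ guarantees the key is present wherever Python looks it up
def pvBuildTemp (root : String) (cs : List (String × Int × String × String)) : PySem.Dict String String :=
  cs.reverse.foldl (fun d y => d.insert y.1 (d.getD y.2.2.1 "" ++ y.2.2.2)) ((PySem.Dict.empty).insert root "")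

-- A's second descending-index while loop, accumulating (huffman_code, compressed_length)
def form_codes (root_symbol : String) (code_stack : List (String × Int × String × String)) : (List (String × String)) × Int :=
  ((code_stack.reverse.foldl
      (fun (acc : PySem.Dict String String × Int) y =>
        if PySem.Str.len y.1 == 1 then
          (acc.1.insert y.1 ((pvBuildTemp root_symbol code_stack).getD y.1 ""),
           acc.2 + PySem.Str.len ((pvBuildTemp root_symbol code_stack).getD y.1 "") * y.2.1)
        else acc)
      (PySem.Dict.empty, 0)).1.items,
   (code_stack.reverse.foldl
      (fun (acc : PySem.Dict String String × Int) y =>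
        if PySem.Str.len y.1 == 1 then
          (acc.1.insert y.1 ((pvBuildTemp root_symbol code_stack).getD y.1 ""),
           acc.2 + PySem.Str.len ((pvBuildTemp root_symbol code_stack).getD y.1 "") * y.2.1)
        else acc)
      (PySem.Dict.empty, 0)).2)

-- ===== PORT B =====
-- B's backward pass: first_idx starts as {root: None}; for each index j the parent of entry j resolves to
-- the value of first_idx at that time (none = the root, some i = the smallest defining index > j).
-- `base` is the absolute index of the head, so pvScan root 0 cs is exactly Source B's backward loop.
-- (outside Pre_ the Python raises KeyError on first_idx[parent]; the port's `.getD none` is only reached there)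
def pvScan (root : String) : Nat → List (String × Int × String × String) → List (Option Nat) × PySem.Dict String (Option Nat)
  | _, [] => ([], (PySem.Dict.empty).insert root none)
  | base, y :: rest =>
    ((((pvScan root (base + 1) rest).2.get? y.2.2.1).getD none) :: (pvScan root (base + 1) rest).1,
     (pvScan root (base + 1) rest).2.insert y.1 (some base))

-- B's 'while j is not None' loop walking up the index chain; the fuel only makes it total (chain indices strictly increase)
def pvWalkIdx (cs : List (String × Int × String × String)) (pidx : List (Option Nat)) :
    Nat → Option Nat → String → String
  | _, none, code => code
  | 0, some _, code => code
  | fuel+1, some j, code =>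
    pvWalkIdx cs pidx fuel (pidx.getD j none) ((cs.getD j ("", 0, "", "")).2.2.2 ++ code)

def form_codes_alt (root_symbol : String) (code_stack : List (String × Int × String × String)) : (List (String × String)) × Int :=
  ((code_stack.reverse.foldl
      (fun (acc : PySem.Dict String String × Int) y =>
        if PySem.Str.len y.1 == 1 then
          (acc.1.insert y.1 (pvWalkIdx code_stack (pvScan root_symbol 0 code_stack).1 (code_stack.length + 1)
              (((pvScan root_symbol 0 code_stack).2.get? y.1).getD none) ""),
           acc.2 + PySem.Str.len (pvWalkIdx code_stack (pvScan root_symbol 0 code_stack).1 (code_stack.length + 1)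
              (((pvScan root_symbol 0 code_stack).2.get? y.1).getD none) "") * y.2.1)
        else acc)
      (PySem.Dict.empty, 0)).1.items,
   (code_stack.reverse.foldl
      (fun (acc : PySem.Dict String String × Int) y =>
        if PySem.Str.len y.1 == 1 then
          (acc.1.insert y.1 (pvWalkIdx code_stack (pvScan root_symbol 0 code_stack).1 (code_stack.length + 1)
              (((pvScan root_symbol 0 code_stack).2.get? y.1).getD none) ""),
           acc.2 + PySem.Str.len (pvWalkIdx code_stack (pvScan root_symbol 0 code_stack).1 (code_stack.length + 1)
              (((pvScan root_symbol 0 code_stack).2.get? y.1).getD none) "") * y.2.1)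
        else acc)
      (PySem.Dict.empty, 0)).2)

-- ===== PRECONDITION & SPEC =====
-- each entry's parent must be the root symbol or an element strictly later in the stack, else A raises KeyError
def pvParentsOK (root : String) : List (String × Int × String × String) → Bool
  | [] => true
  | y :: rest => (y.2.2.1 == root || (rest.map (·.1)).contains y.2.2.1) && pvParentsOK root rest

-- Pre_ excludes exactly the inputs on which Python A raises KeyError (a parent neither the root nor defined later)
def Pre_form_codes (root_symbol : String) (code_stack : List (String × Int × String × String)) : Prop :=
  pvParentsOK root_symbol code_stack = true
instance (root_symbol : String) (code_stack : List (String × Int × String × String)) : Decidable (Pre_form_codes root_symbol code_stack) := by unfold Pre_form_codes; infer_instance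

def pvWitness_form_codes : String × (List (String × Int × String × String)) :=
  ("R", [("a", 2, "ab", "1"), ("b", 3, "ab", "0"), ("ab", 5, "R", "0"), ("c", 4, "R", "1")])

def Spec_form_codes (root_symbol : String) (code_stack : List (String × Int × String × String)) (out : (List (String × String)) × Int) : Prop := out = form_codes_alt root_symbol code_stack
instance (root_symbol : String) (code_stack : List (String × Int × String × String)) (out : (List (String × String)) × Int) : Decidable (Spec_form_codes root_symbol code_stack out) := by unfold Spec_form_codes; infer_instance

-- ===== CLAIM (what is proved, stated in full; the proofs are below) =====
def Claim_equal_form_codes : Prop := ∀ (root_symbol : String) (code_stack : List (String × Int × String × String)), Dom_form_codes root_symbol code_stack → Pre_form_codes root_symbol code_stack → Spec_form_codes root_symbol code_stack (form_codes root_symbol code_stack)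

-- ===== LEMMAS AND PROOFS =====

lemma pvBuildTemp_cons (root : String) (y : String × Int × String × String) (cs : List (String × Int × String × String)) :
    pvBuildTemp root (y :: cs) =
      (pvBuildTemp root cs).insert y.1 ((pvBuildTemp root cs).getD y.2.2.1 "" ++ y.2.2.2) := by
  simp [pvBuildTemp, List.foldl_append]

-- the first-occurrence map built by B's backward pass (seeded with {root: None})
lemma pvScan_first (root : String) (cs : List (String × Int × String × String)) :
    ∀ (base : Nat) (e : String),
      (pvScan root base cs).2.get? e =
        match cs.findIdx? (fun z => z.1 == e) with
        | some i => some (some (i + base))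
        | none => if e = root then some none else none := by
  induction cs with
  | nil =>
    intro base e
    simp only [pvScan, PySem.Dict.get?_insert, List.findIdx?_nil, PySem.Dict.get?_empty]
  | cons y rest ih =>
    intro base e
    simp only [pvScan, PySem.Dict.get?_insert, List.findIdx?_cons]
    by_cases h : y.1 = e
    · simp [h]
    · have h' : e ≠ y.1 := fun hc => h hc.symm
      rw [if_neg h', if_neg (by simpa using h), ih (base + 1) e]
      cases hfi : rest.findIdx? (fun z => z.1 == e) with
      | none => simp
      | some i =>
        simp only [Option.map_some]
        have : i + (base + 1) = i + 1 + base := by omega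
        rw [this]

-- the parent-index list built by B's backward pass
lemma pvScan_pidx (root : String) (cs : List (String × Int × String × String)) :
    ∀ (base k : Nat) (h : k < cs.length),
      (pvScan root base cs).1.getD k none
        = ((cs.drop (k + 1)).findIdx? (fun z => z.1 == (cs[k]'h).2.2.1)).map (· + (base + k + 1)) := by
  induction cs with
  | nil => intro base k h; simp at h
  | cons y rest ih =>
    intro base k h
    match k with
    | 0 =>
      simp only [pvScan, List.getD_cons_zero, List.drop_succ_cons, List.drop_zero, List.getElem_cons_zero]
      rw [pvScan_first root rest (base + 1) y.2.2.1]
      cases hfi : rest.findIdx? (fun z => z.1 == y.2.2.1) with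
      | none =>
        show (if y.2.2.1 = root then some none else none).getD none = _
        split_ifs <;> rfl
      | some i =>
        show some (i + (base + 1)) = Option.map (fun x => x + (base + 0 + 1)) (some i)
        simp only [Option.map_some]
    | Nat.succ k' =>
      simp only [pvScan, List.getD_cons_succ, List.drop_succ_cons, List.getElem_cons_succ]
      have harith : base + 1 + k' + 1 = base + (k' + 1) + 1 := by omega
      rw [ih (base + 1) k' (by simpa using Nat.lt_of_succ_lt_succ h), harith]

-- a symbol never defined in the stack has the empty code in A's temp_dict (via the getD "" default / the root's '')
lemma pvBuildTemp_getD_missing (root : String) (l : List (String × Int × String × String)) (p : String)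
    (h : ∀ z ∈ l, (z.1 == p) = false) : (pvBuildTemp root l).getD p "" = "" := by
  induction l with
  | nil =>
    simp only [pvBuildTemp, List.reverse_nil, List.foldl_nil]
    by_cases hp : p = root
    · rw [hp, PySem.Dict.getD_insert_self]
    · rw [PySem.Dict.getD_insert_of_ne _ _ _ hp, PySem.Dict.getD_empty]
  | cons y rest ih =>
    have hy : p ≠ y.1 := by
      have := h y (List.mem_cons_self)
      simp only [beq_eq_false_iff_ne, ne_eq] at this
      exact fun hc => this hc.symm
    rw [pvBuildTemp_cons, PySem.Dict.getD_insert_of_ne _ _ _ hy]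
    exact ih (fun z hz => h z (List.mem_cons_of_mem _ hz))

-- A's temp_dict value of a symbol is determined by the suffix from its first defining index
lemma pvBuildTemp_getD_drop (root : String) (l : List (String × Int × String × String)) (p : String) :
    ∀ (k : Nat), l.findIdx? (fun z => z.1 == p) = some k →
      (pvBuildTemp root l).getD p "" = (pvBuildTemp root (l.drop k)).getD p "" := by
  induction l with
  | nil => intro k hk; simp at hk
  | cons y rest ih =>
    intro k hk
    rw [List.findIdx?_cons] at hk
    by_cases hy : (y.1 == p) = true
    · rw [if_pos hy] at hk
      cases hk
      rfl
    · rw [if_neg hy] at hk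
      cases hfi : rest.findIdx? (fun z => z.1 == p) with
      | none => rw [hfi] at hk; simp at hk
      | some k' =>
        rw [hfi] at hk
        simp only [Option.map_some] at hk
        cases hk
        have hne : p ≠ y.1 := by
          simp only [beq_iff_eq] at hy
          exact fun hc => hy hc.symm
        rw [pvBuildTemp_cons, PySem.Dict.getD_insert_of_ne _ _ _ hne, ih k' hfi,
          List.drop_succ_cons]

lemma pvWalkIdx_shift (cs : List (String × Int × String × String)) (pidx : List (Option Nat)) :
    ∀ (fuel : Nat) (oj : Option Nat) (acc : String),
      pvWalkIdx cs pidx fuel oj acc = pvWalkIdx cs pidx fuel oj "" ++ acc := by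
  intro fuel
  induction fuel with
  | zero =>
    intro oj acc
    cases oj <;> simp [pvWalkIdx]
  | succ f ih =>
    intro oj acc
    cases oj with
    | none => simp [pvWalkIdx]
    | some j =>
      show pvWalkIdx cs pidx f (pidx.getD j none) ((cs.getD j ("", 0, "", "")).2.2.2 ++ acc)
          = pvWalkIdx cs pidx f (pidx.getD j none) ((cs.getD j ("", 0, "", "")).2.2.2 ++ "") ++ acc
      rw [ih (pidx.getD j none) ((cs.getD j ("", 0, "", "")).2.2.2 ++ acc),
        ih (pidx.getD j none) ((cs.getD j ("", 0, "", "")).2.2.2 ++ "")]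
      rw [String.append_empty]
      exact String.append_assoc.symm

-- the key invariant: B's chain walk from index j computes A's temp_dict entry of the element defined at j,
-- as determined by the suffix from j
lemma pvWalk_eq_temp (root : String) (cs : List (String × Int × String × String)) :
    ∀ (fuel j : Nat) (h : j < cs.length), cs.length ≤ fuel + j →
      pvWalkIdx cs (pvScan root 0 cs).1 fuel (some j) ""
        = (pvBuildTemp root (cs.drop j)).getD ((cs[j]'h).1) "" := by
  intro fuel
  induction fuel with
  | zero => intro j h hf; omega
  | succ f ih =>
    intro j h hf
    have hgetj : cs.getD j ("", 0, "", "") = cs[j]'h := List.getD_eq_getElem cs _ h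
    have hdrop : cs.drop j = (cs[j]'h) :: cs.drop (j + 1) := List.drop_eq_getElem_cons h
    simp only [pvWalkIdx, pvScan_pidx root cs 0 j h]
    cases hfi : (cs.drop (j + 1)).findIdx? (fun z => z.1 == (cs[j]'h).2.2.1) with
    | none =>
      simp only [Option.map_none, pvWalkIdx]
      rw [hgetj, hdrop, pvBuildTemp_cons, PySem.Dict.getD_insert_self,
        pvBuildTemp_getD_missing root _ _ (List.findIdx?_eq_none_iff.mp hfi),
        String.append_empty, String.empty_append]
    | some k =>
      simp only [Option.map_some]
      obtain ⟨hk, hpk, -⟩ := List.findIdx?_eq_some_iff_getElem.mp hfi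
      have hklen : k + (j + 1) < cs.length := by
        have hk' := hk
        rw [List.length_drop] at hk'
        omega
      have hj' : k + (0 + j + 1) < cs.length := by omega
      have helem : (cs[k + (0 + j + 1)]'hj').1 = (cs[j]'h).2.2.1 := by
        have : (cs.drop (j + 1))[k]'hk = cs[k + (0 + j + 1)]'hj' := by
          rw [List.getElem_drop]
          congr 1
          omega
        rw [this] at hpk
        exact beq_iff_eq.mp hpk
      rw [pvWalkIdx_shift, String.append_empty, hgetj]
      rw [ih (k + (0 + j + 1)) hj' (by omega)]
      rw [hdrop, pvBuildTemp_cons, PySem.Dict.getD_insert_self]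
      rw [pvBuildTemp_getD_drop root _ _ k hfi, List.drop_drop]
      have hidx : j + 1 + k = k + (0 + j + 1) := by omega
      rw [hidx, helem]

-- B's first_idx lookup of an element present in the stack, combined with the lemmas above:
-- A's finished temp_dict agrees with B's chain walk on every element of the stack
lemma pvTemp_eq_walk (root : String) (cs : List (String × Int × String × String))
    (y : String × Int × String × String) (hy : y ∈ cs) :
    (pvBuildTemp root cs).getD y.1 ""
      = pvWalkIdx cs (pvScan root 0 cs).1 (cs.length + 1)
          (((pvScan root 0 cs).2.get? y.1).getD none) "" := by
  cases hfi : cs.findIdx? (fun z => z.1 == y.1) with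
  | none =>
    exact absurd (List.findIdx?_eq_none_iff.mp hfi y hy) (by simp)
  | some j0 =>
    have hget : ((pvScan root 0 cs).2.get? y.1).getD none = some j0 := by
      rw [pvScan_first root cs 0 y.1, hfi]
      simp
    obtain ⟨hj0, hpj0, -⟩ := List.findIdx?_eq_some_iff_getElem.mp hfi
    rw [hget, pvWalk_eq_temp root cs (cs.length + 1) j0 hj0 (by omega)]
    rw [pvBuildTemp_getD_drop root cs y.1 j0 hfi]
    congr 1
    exact (beq_iff_eq.mp hpj0).symm

-- ===== VERDICT (by name: the statement is the Claim_ definition above) =====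
theorem form_codes_spec : Claim_equal_form_codes := by
  intro root cs _hdom _hpre
  unfold Spec_form_codes form_codes form_codes_alt
  have hfold :
      cs.reverse.foldl
        (fun (acc : PySem.Dict String String × Int) y =>
          if PySem.Str.len y.1 == 1 then
            (acc.1.insert y.1 ((pvBuildTemp root cs).getD y.1 ""),
             acc.2 + PySem.Str.len ((pvBuildTemp root cs).getD y.1 "") * y.2.1)
          else acc)
        (PySem.Dict.empty, 0)
      = cs.reverse.foldl
        (fun (acc : PySem.Dict String String × Int) y =>
          if PySem.Str.len y.1 == 1 then
            (acc.1.insert y.1 (pvWalkIdx cs (pvScan root 0 cs).1 (cs.length + 1)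
                (((pvScan root 0 cs).2.get? y.1).getD none) ""),
             acc.2 + PySem.Str.len (pvWalkIdx cs (pvScan root 0 cs).1 (cs.length + 1)
                (((pvScan root 0 cs).2.get? y.1).getD none) "") * y.2.1)
          else acc)
        (PySem.Dict.empty, 0) := by
    refine PySem.List.foldl_congr_mem _ _ _ _ (fun acc y hy => ?_)
    rw [pvTemp_eq_walk root cs y (List.mem_reverse.mp hy)]
  rw [hfold]
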